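-- pv_equiv track=rewrite | github.com/723poil/coding-test-study | week4/05. 잃어버린 괄호/잃어버린_괄호_이상협.py | findMin
-- ===== SOURCE A (Python) =====
-- def findMin(sss: list) -> int:
--     temp_sum = 0
--     result = 0
--
--     for i in range(len(sss)-1, -1, -1):
--         if sss[i].isdigit():
--             temp_sum += int(sss[i])
--             continue
--
--         if sss[i] == '+':
--             continue
--
--         result -= temp_sum
--         temp_sum = 0
--
--     return result + temp_sum
-- ===== SOURCE B (Python) =====
-- def findMin(sss: list) -> int:
--     # Forward scan: partition tokens into contiguous group sums (a group is
--     # closed by any token that is neither a digit-string nor '+'), then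
--     # reduce: first group positive, every later group subtracted.
--     done = []   # completed group sums
--     cur = 0     # current group sum
--     for s in sss:
--         if s.isdigit():
--             cur += int(s)
--         elif s != '+':
--             done.append(cur)
--             cur = 0
--     groups = done + [cur]
--     return groups[0] - sum(groups[1:])
-- ===== Notes on version B (the rewrite author's own statement) =====
-- stated objective: alternative
-- what changed: Replaces A's reverse-index scan with two running accumulators by a forward partition of the tokens into group sums followed by a single reduce (first group minus the rest).
import Mathlib
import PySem

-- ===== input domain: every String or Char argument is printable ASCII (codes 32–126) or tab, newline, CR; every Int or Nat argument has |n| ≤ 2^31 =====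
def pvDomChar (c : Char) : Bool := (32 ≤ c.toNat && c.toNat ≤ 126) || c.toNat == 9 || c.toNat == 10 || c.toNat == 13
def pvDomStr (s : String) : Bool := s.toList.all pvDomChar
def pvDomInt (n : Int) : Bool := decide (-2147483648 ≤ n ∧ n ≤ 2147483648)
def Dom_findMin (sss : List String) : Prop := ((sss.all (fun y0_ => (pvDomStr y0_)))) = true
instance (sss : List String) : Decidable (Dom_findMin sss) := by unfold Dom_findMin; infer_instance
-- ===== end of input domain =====

-- B replaces A's reverse-index scan (two running accumulators) by a forward
-- partition into group sums followed by one reduce; same O(n) cost.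


-- ===== PORT A =====
-- reverse iteration 'for i in range(len(sss)-1,-1,-1)' rendered as a fold over sss.reverse;
-- int(s) is only reached when isdigit s, where PySem.Int.ofStr? is some (ASCII domain), so .getD 0 is never the default
def aStep (st : Int × Int) (s : String) : Int × Int :=
  if PySem.Str.strIsdigit s then (st.1 + (PySem.Int.ofStr? s).getD 0, st.2)
  else if s = "+" then st
  else (0, st.2 - st.1)

def findMin (sss : List String) : Int :=
  let st := sss.reverse.foldl aStep (0, 0)
  st.2 + st.1

-- ===== PORT B =====
def bStep (st : List Int × Int) (s : String) : List Int × Int :=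
  if PySem.Str.strIsdigit s then (st.1, st.2 + (PySem.Int.ofStr? s).getD 0)
  else if s = "+" then st
  else (st.1 ++ [st.2], 0)

-- groups[0] - sum(groups[1:])
def gval : List Int → Int
  | [] => 0
  | g :: rest => g - rest.sum

def findMin_alt (sss : List String) : Int :=
  let st := sss.foldl bStep ([], 0)
  gval (st.1 ++ [st.2])

-- ===== PRECONDITION & SPEC =====
def Spec_findMin (sss : List String) (out : Int) : Prop := out = findMin_alt sss
instance (sss : List String) (out : Int) : Decidable (Spec_findMin sss out) := by unfold Spec_findMin; infer_instance

-- ===== CLAIM (what is proved, stated in full; the proofs are below) =====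
def Claim_equal_findMin : Prop := ∀ (sss : List String), Dom_findMin sss → Spec_findMin sss (findMin sss)

-- ===== LEMMAS AND PROOFS =====

-- sum of the leading digit group (digits accumulated, '+' skipped, stops at the first separator)
def leadG (l : List String) : Int :=
  l.foldr (fun s acc => if PySem.Str.strIsdigit s then (PySem.Int.ofStr? s).getD 0 + acc
                        else if s = "+" then acc else 0) 0

-- total sum of all digit tokens
def totN (l : List String) : Int :=
  l.foldr (fun s acc => if PySem.Str.strIsdigit s then (PySem.Int.ofStr? s).getD 0 + acc
                        else acc) 0

theorem aStep_digit (st : Int × Int) (s : String) (h : PySem.Str.strIsdigit s = true) :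
    aStep st s = (st.1 + (PySem.Int.ofStr? s).getD 0, st.2) := by unfold aStep; rw [if_pos h]

theorem aStep_plus (st : Int × Int) (s : String) (h1 : ¬ PySem.Str.strIsdigit s = true)
    (h2 : s = "+") : aStep st s = st := by unfold aStep; rw [if_neg h1, if_pos h2]

theorem aStep_sep (st : Int × Int) (s : String) (h1 : ¬ PySem.Str.strIsdigit s = true)
    (h2 : ¬ s = "+") : aStep st s = (0, st.2 - st.1) := by unfold aStep; rw [if_neg h1, if_neg h2]

theorem bStep_digit (st : List Int × Int) (s : String) (h : PySem.Str.strIsdigit s = true) :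
    bStep st s = (st.1, st.2 + (PySem.Int.ofStr? s).getD 0) := by unfold bStep; rw [if_pos h]

theorem bStep_plus (st : List Int × Int) (s : String) (h1 : ¬ PySem.Str.strIsdigit s = true)
    (h2 : s = "+") : bStep st s = st := by unfold bStep; rw [if_neg h1, if_pos h2]

theorem bStep_sep (st : List Int × Int) (s : String) (h1 : ¬ PySem.Str.strIsdigit s = true)
    (h2 : ¬ s = "+") : bStep st s = (st.1 ++ [st.2], 0) := by unfold bStep; rw [if_neg h1, if_neg h2]

theorem leadG_cons_digit (s : String) (l : List String) (h : PySem.Str.strIsdigit s = true) :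
    leadG (s :: l) = (PySem.Int.ofStr? s).getD 0 + leadG l := by simp only [leadG, List.foldr_cons]; rw [if_pos h]

theorem leadG_cons_plus (s : String) (l : List String) (h1 : ¬ PySem.Str.strIsdigit s = true)
    (h2 : s = "+") : leadG (s :: l) = leadG l := by simp only [leadG, List.foldr_cons]; rw [if_neg h1, if_pos h2]

theorem leadG_cons_sep (s : String) (l : List String) (h1 : ¬ PySem.Str.strIsdigit s = true)
    (h2 : ¬ s = "+") : leadG (s :: l) = 0 := by simp only [leadG, List.foldr_cons]; rw [if_neg h1, if_neg h2]

theorem totN_cons_digit (s : String) (l : List String) (h : PySem.Str.strIsdigit s = true) :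
    totN (s :: l) = (PySem.Int.ofStr? s).getD 0 + totN l := by simp only [totN, List.foldr_cons]; rw [if_pos h]

theorem totN_cons_nondigit (s : String) (l : List String) (h : ¬ PySem.Str.strIsdigit s = true) :
    totN (s :: l) = totN l := by simp only [totN, List.foldr_cons]; rw [if_neg h]

theorem aFold_char (l : List String) :
    l.foldr (fun s st => aStep st s) ((0 : Int), (0 : Int)) = (leadG l, leadG l - totN l) := by
  induction l with
  | nil => simp [leadG, totN]
  | cons s l ih =>
    rw [List.foldr_cons, ih]
    by_cases h1 : PySem.Str.strIsdigit s = true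
    · rw [aStep_digit _ _ h1, leadG_cons_digit _ _ h1, totN_cons_digit _ _ h1]
      simp only [Prod.mk.injEq]
      exact ⟨by ring, by ring⟩
    · by_cases h2 : s = "+"
      · rw [aStep_plus _ _ h1 h2, leadG_cons_plus _ _ h1 h2, totN_cons_nondigit _ _ h1]
      · rw [aStep_sep _ _ h1 h2, leadG_cons_sep _ _ h1 h2, totN_cons_nondigit _ _ h1]
        simp only [Prod.mk.injEq]
        exact ⟨trivial, by ring⟩

theorem findMin_char (l : List String) : findMin l = 2 * leadG l - totN l := by
  simp only [findMin, List.foldl_reverse, aFold_char]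
  ring

theorem bFold_append (l : List String) (gs : List Int) (cur : Int) :
    l.foldl bStep (gs, cur) =
      (gs ++ (l.foldl bStep ([], cur)).1, (l.foldl bStep ([], cur)).2) := by
  induction l generalizing gs cur with
  | nil => simp
  | cons s l ih =>
    rw [List.foldl_cons, List.foldl_cons]
    by_cases h1 : PySem.Str.strIsdigit s = true
    · rw [bStep_digit (gs, cur) _ h1, bStep_digit ([], cur) _ h1]
      exact ih gs _
    · by_cases h2 : s = "+"
      · rw [bStep_plus (gs, cur) _ h1 h2, bStep_plus ([], cur) _ h1 h2]
        exact ih gs cur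
      · rw [bStep_sep (gs, cur) _ h1 h2, bStep_sep ([], cur) _ h1 h2]
        simp only [List.nil_append]
        rw [ih (gs ++ [cur]) 0, ih [cur] 0]
        simp

theorem bFold_sum (l : List String) (cur : Int) :
    ((l.foldl bStep ([], cur)).1).sum + (l.foldl bStep ([], cur)).2 = cur + totN l := by
  induction l generalizing cur with
  | nil => simp [totN]
  | cons s l ih =>
    rw [List.foldl_cons]
    by_cases h1 : PySem.Str.strIsdigit s = true
    · rw [bStep_digit _ _ h1, totN_cons_digit _ _ h1]
      simp only []
      rw [ih (cur + _)]
      ring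
    · by_cases h2 : s = "+"
      · rw [bStep_plus _ _ h1 h2, totN_cons_nondigit _ _ h1, ih cur]
      · rw [bStep_sep _ _ h1 h2, totN_cons_nondigit _ _ h1]
        simp only [List.nil_append]
        rw [bFold_append l [cur] 0]
        simp only [List.sum_append, List.sum_cons, List.sum_nil]
        have := ih 0
        omega

theorem bFold_val (l : List String) (cur : Int) :
    gval ((l.foldl bStep ([], cur)).1 ++ [(l.foldl bStep ([], cur)).2]) =
      cur + 2 * leadG l - totN l := by
  induction l generalizing cur with
  | nil => simp [gval, leadG, totN]
  | cons s l ih =>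
    rw [List.foldl_cons]
    by_cases h1 : PySem.Str.strIsdigit s = true
    · rw [bStep_digit _ _ h1, leadG_cons_digit _ _ h1, totN_cons_digit _ _ h1]
      simp only []
      rw [ih (cur + _)]
      ring
    · by_cases h2 : s = "+"
      · rw [bStep_plus _ _ h1 h2, leadG_cons_plus _ _ h1 h2, totN_cons_nondigit _ _ h1, ih cur]
      · rw [bStep_sep _ _ h1 h2, leadG_cons_sep _ _ h1 h2, totN_cons_nondigit _ _ h1]
        simp only [List.nil_append]
        rw [bFold_append l [cur] 0]
        simp only [List.cons_append, gval, List.sum_append, List.sum_cons, List.sum_nil]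
        have := bFold_sum l 0
        omega

-- ===== VERDICT (by name: the statement is the Claim_ definition above) =====
theorem findMin_spec : Claim_equal_findMin := by
  intro sss _
  unfold Spec_findMin
  rw [findMin_char]
  unfold findMin_alt
  rw [bFold_val]
  ring
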